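-- pv_equiv track=rewrite | github.com/SpiNNakerManchester/PACMAN | pacman/operations/router_check_functionality/valid_routes_checker.py | _processor_value
-- ===== SOURCE A (Python) =====
-- def _processor_value(route_value):
--     """
--     returns a processor vlaue or None based on if the route value contains
--      a processor point
--     """
--     processor_ids = list()
--     masked_off_values = route_value & 0x7FFFC0
--     if masked_off_values == 0:
--         return None
--     else:
--         masks = [0x40, 0x80, 0x100, 0x200, 0x400, 0x800, 0x1000, 0x2000,
--                  0x4000, 0x8000, 0x10000, 0x20000, 0x40000, 0x80000,
--                  0x100000, 0x200000, 0x400000, 0x800000]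
--         processor_id = 0
--         for mask in masks:
--             final_mask_value = masked_off_values & mask
--             if final_mask_value != 0:
--                 processor_ids.append(processor_id)
--             processor_id += 1
--         return processor_ids
-- ===== SOURCE B (Python) =====
-- def _processor_value(route_value):
--     # Traverse only the set bits: clear the lowest set bit each step and
--     # record its position (bit_length of the isolated bit minus 7 = bit index - 6).
--     masked = route_value & 0x7FFFC0
--     if masked == 0:
--         return None
--     ids = []
--     while masked:
--         low = masked & (masked - 1)          # masked with its lowest set bit cleared
--         ids.append((masked ^ low).bit_length() - 7)
--         masked = low
--     return ids
-- ===== Notes on version B (the rewrite author's own statement) =====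
-- stated objective: alternative
-- what changed: A scans a fixed list of eighteen masks with a running processor-id counter; B iterates only over the set bits of the masked value, isolating and clearing the lowest set bit each step and computing its position from bit_length.
import Mathlib
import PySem

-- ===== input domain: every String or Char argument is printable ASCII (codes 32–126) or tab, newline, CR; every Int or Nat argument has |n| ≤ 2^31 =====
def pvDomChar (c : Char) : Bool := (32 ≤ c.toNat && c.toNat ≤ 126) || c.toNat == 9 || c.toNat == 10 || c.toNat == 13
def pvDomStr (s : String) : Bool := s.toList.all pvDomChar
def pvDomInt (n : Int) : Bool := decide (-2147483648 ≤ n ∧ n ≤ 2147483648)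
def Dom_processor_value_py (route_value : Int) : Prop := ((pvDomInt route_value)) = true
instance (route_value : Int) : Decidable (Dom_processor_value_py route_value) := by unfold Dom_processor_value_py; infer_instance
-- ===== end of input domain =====

-- B re-implements A's 18-mask scan by iterating only over the set bits of the masked
-- value (clearing the lowest set bit each step); same return value, alternative algorithm.

-- ===== PORT A =====
def processor_value_py (route_value : Int) : Option (List Int) :=
  let processor_ids : List Int := []
  let masked_off_values := PySem.Int.band route_value 0x7FFFC0
  if masked_off_values = 0 then
    none
  else
    let masks : List Int := [0x40, 0x80, 0x100, 0x200, 0x400, 0x800, 0x1000, 0x2000,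
                             0x4000, 0x8000, 0x10000, 0x20000, 0x40000, 0x80000,
                             0x100000, 0x200000, 0x400000, 0x800000]
    let st := masks.foldl (fun (st : List Int × Int) mask =>
      let final_mask_value := PySem.Int.band masked_off_values mask
      (if final_mask_value ≠ 0 then st.1 ++ [st.2] else st.1, st.2 + 1)) (processor_ids, 0)
    some st.1

-- ===== PORT B =====
-- the while-loop of Source B; it runs on the Nat value of `masked` (which is ≥ 0 whenever
-- the loop is entered, since masked = route_value & 0x7FFFC0 with a non-negative mask)
def pvLoop (masked : Nat) : List Int :=
  if h : masked = 0 then []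
  else
    let low := masked &&& (masked - 1)
    ((PySem.Int.bitLength ((masked ^^^ low : Nat) : Int) : Int) - 7) :: pvLoop low
termination_by masked
decreasing_by
  have h1 : masked &&& (masked - 1) ≤ masked - 1 := Nat.and_le_right
  omega

def processor_value_py_alt (route_value : Int) : Option (List Int) :=
  let masked := PySem.Int.band route_value 0x7FFFC0
  if masked = 0 then none
  else some (pvLoop masked.toNat)

-- ===== PRECONDITION & SPEC =====
def Spec_processor_value_py (route_value : Int) (out : Option (List Int)) : Prop := out = processor_value_py_alt route_value
instance (route_value : Int) (out : Option (List Int)) : Decidable (Spec_processor_value_py route_value out) := by unfold Spec_processor_value_py; infer_instance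

-- ===== CLAIM (what is proved, stated in full; the proofs are below) =====
def Claim_equal_processor_value_py : Prop := ∀ (route_value : Int), Dom_processor_value_py route_value → Spec_processor_value_py route_value (processor_value_py route_value)

-- ===== LEMMAS AND PROOFS =====

theorem pvLoop_zero : pvLoop 0 = [] := by
  rw [pvLoop]; simp

theorem pvAnd_lt {k : Nat} (hk : k ≠ 0) : k &&& (k - 1) < k := by
  have h1 : k &&& (k - 1) ≤ k - 1 := Nat.and_le_right
  omega

theorem pvAnd_two_mul (k : Nat) : (2 * k) &&& (2 * k - 1) = 2 * (k &&& (k - 1)) := by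
  rcases Nat.eq_zero_or_pos k with hk | hk
  · subst hk; rfl
  apply Nat.eq_of_testBit_eq
  intro i
  cases i with
  | zero => simp [Nat.testBit_zero, Nat.mul_mod_right]
  | succ i =>
    have e1 : 2 * k / 2 = k := by omega
    have e2 : (2 * k - 1) / 2 = k - 1 := by omega
    have e3 : 2 * (k &&& (k - 1)) / 2 = k &&& (k - 1) := by omega
    simp only [Nat.testBit_land]
    simp [Nat.testBit_add_one, e1, e2, e3]

theorem pvXor_two_mul (k : Nat) :
    (2 * k) ^^^ (2 * (k &&& (k - 1))) = 2 * (k ^^^ (k &&& (k - 1))) := by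
  apply Nat.eq_of_testBit_eq
  intro i
  cases i with
  | zero => simp [Nat.testBit_zero, Nat.mul_mod_right]
  | succ i =>
    have e1 : 2 * k / 2 = k := by omega
    have e3 : 2 * (k &&& (k - 1)) / 2 = k &&& (k - 1) := by omega
    have e4 : 2 * (k ^^^ (k &&& (k - 1))) / 2 = k ^^^ (k &&& (k - 1)) := by omega
    simp only [Nat.testBit_xor]
    simp [Nat.testBit_add_one, e1, e3, e4]

theorem pvXor_low_ne (k : Nat) (hk : k ≠ 0) : k ^^^ (k &&& (k - 1)) ≠ 0 := by
  intro h
  have h1 : k = k &&& (k - 1) := Nat.eq_of_xor_eq_zero h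
  have h2 : k &&& (k - 1) ≤ k - 1 := Nat.and_le_right
  omega

theorem pvBitLength_two_mul (x : Nat) (hx : x ≠ 0) :
    PySem.Int.bitLength ((2 * x : Nat) : Int) = PySem.Int.bitLength ((x : Nat) : Int) + 1 := by
  rw [PySem.Int.bitLength_natCast (m := 2 * x) (by omega), Nat.mul_div_cancel_left x (by omega)]

theorem pvLoop_even (k : Nat) : pvLoop (2 * k) = (pvLoop k).map (· + 1) := by
  induction k using Nat.strong_induction_on with
  | _ k ih =>
    rcases Nat.eq_zero_or_pos k with hk | hk
    · subst hk; simp [pvLoop_zero]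
    have hk0 : k ≠ 0 := by omega
    have h2k : 2 * k ≠ 0 := by omega
    rw [pvLoop, pvLoop]
    simp only [hk0, h2k, dif_neg, not_false_iff]
    rw [pvAnd_two_mul, pvXor_two_mul k, pvBitLength_two_mul _ (pvXor_low_ne k hk0),
        ih (k &&& (k - 1)) (pvAnd_lt hk0)]
    simp only [List.map_cons]
    congr 1
    push_cast
    ring

theorem pvLoop_odd (k : Nat) : pvLoop (2 * k + 1) = (-6 : Int) :: (pvLoop k).map (· + 1) := by
  have hmod : (2 * k + 1) % 2 = 1 := by omega
  have h1 : (2 * k + 1) &&& (2 * k) = 2 * k := by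
    apply Nat.eq_of_testBit_eq
    intro i
    cases i with
    | zero => simp [Nat.testBit_zero, hmod, Nat.mul_mod_right]
    | succ i =>
      have e1 : (2 * k + 1) / 2 = k := by omega
      have e2 : 2 * k / 2 = k := by omega
      simp only [Nat.testBit_land]
      simp [Nat.testBit_add_one, e1, e2]
  have h2 : (2 * k + 1) ^^^ (2 * k) = 1 := by
    apply Nat.eq_of_testBit_eq
    intro i
    cases i with
    | zero => simp [Nat.testBit_zero, hmod]
    | succ i =>
      have e1 : (2 * k + 1) / 2 = k := by omega
      have e2 : 2 * k / 2 = k := by omega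
      simp only [Nat.testBit_xor]
      simp [Nat.testBit_add_one, e1, e2]
  have h3 : 2 * k + 1 ≠ 0 := by omega
  rw [pvLoop]
  simp only [h3, dif_neg, not_false_iff, Nat.add_sub_cancel, h1, h2, pvLoop_even]
  norm_num [show PySem.Int.bitLength (1 : Int) = 1 from by decide]

theorem pvLoop_bits (j : Nat) : ∀ t : Nat, t < 2 ^ j →
    pvLoop t = ((List.range j).filter t.testBit).map (fun p => Int.ofNat p - 6) := by
  induction j with
  | zero =>
    intro t ht
    have : t = 0 := by omega
    subst this
    simp [pvLoop_zero]
  | succ j ih =>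
    intro t ht
    rcases Nat.eq_zero_or_pos t with h0 | h0
    · subst h0
      simp [pvLoop_zero, Nat.zero_testBit]
    obtain ⟨k, hk⟩ : ∃ k, t = 2 * k ∨ t = 2 * k + 1 := ⟨t / 2, by omega⟩
    have hpow : (2:Nat) ^ (j + 1) = 2 * 2 ^ j := by rw [pow_succ]; ring
    have hklt : k < 2 ^ j := by rcases hk with rfl | rfl <;> omega
    have hrange : List.range (j + 1) = 0 :: (List.range j).map (· + 1) := by
      rw [List.range_succ_eq_map]
    rcases hk with rfl | rfl
    · have ht0 : (2 * k).testBit 0 = false := by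
        simp [Nat.testBit_zero, Nat.mul_mod_right]
      have htS : ∀ i, (2 * k).testBit (i + 1) = k.testBit i := by
        intro i
        rw [Nat.testBit_add_one]
        congr 1
        omega
      rw [pvLoop_even, ih k hklt, hrange]
      simp only [List.filter_cons, ht0, Bool.false_eq_true, if_false, List.filter_map,
        Function.comp_def, htS, List.map_map]
      exact List.map_congr_left fun a _ => by simp only [Int.ofNat_eq_natCast]; push_cast; ring
    · have ht0 : (2 * k + 1).testBit 0 = true := by
        simp [Nat.testBit_zero]
      have htS : ∀ i, (2 * k + 1).testBit (i + 1) = k.testBit i := by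
        intro i
        rw [Nat.testBit_add_one]
        congr 1
        omega
      rw [pvLoop_odd, ih k hklt, hrange]
      simp only [List.filter_cons, ht0, if_true, List.filter_map,
        Function.comp_def, htS, List.map_map, List.map_cons, List.cons.injEq]
      exact ⟨by decide, List.map_congr_left fun a _ => by simp only [Int.ofNat_eq_natCast]; push_cast; ring⟩

theorem pvFoldA (n : Nat) (k : Nat) :
    (((List.range k).map (fun i => ((2 ^ (i + 6) : Nat) : Int))).foldl
      (fun (st : List Int × Int) mask =>
        let final_mask_value := PySem.Int.band ((n : Nat) : Int) mask
        (if final_mask_value ≠ 0 then st.1 ++ [st.2] else st.1, st.2 + 1))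
      (([] : List Int), (0 : Int)))
    = (((List.range k).filter (fun i => n.testBit (i + 6))).map (fun i => Int.ofNat i), (k : Int)) := by
  induction k with
  | zero => simp
  | succ k ih =>
    rw [List.range_succ, List.map_append, List.foldl_append, ih]
    simp only [List.map_cons, List.map_nil, List.foldl_cons, List.foldl_nil]
    rw [PySem.Int.band_natCast n (2 ^ (k + 6))]
    rw [List.filter_append, List.map_append]
    by_cases hb : n.testBit (k + 6)
    · have hne : ((n &&& 2 ^ (k + 6) : Nat) : Int) ≠ 0 := by
        rw [Nat.and_two_pow, hb]
        simp only [Bool.toNat_true, one_mul, ne_eq, Nat.cast_eq_zero]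
        positivity
      rw [if_pos hne]
      simp only [List.filter_cons, List.filter_nil, hb, if_true, List.map_cons, List.map_nil,
        Prod.mk.injEq]
      constructor
      · rfl
      · push_cast
        ring
    · have heq : ((n &&& 2 ^ (k + 6) : Nat) : Int) = 0 := by
        rw [Nat.and_two_pow]
        simp [hb]
      rw [if_neg (by simp [heq])]
      simp only [List.filter_cons, List.filter_nil, hb, Bool.false_eq_true, if_false,
        List.map_nil, List.append_nil, Prod.mk.injEq]
      refine ⟨trivial, by push_cast; ring⟩

theorem pvShift6 (j : Nat) (n : Nat) :
    ((List.range j).filter (fun i => n.testBit (i + 6))).map (fun i => Int.ofNat i)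
      = (((List.range j).map (· + 6)).filter n.testBit).map (fun p => Int.ofNat p - 6) := by
  rw [List.filter_map, List.map_map]
  simp only [Function.comp_def]
  exact List.map_congr_left fun a _ => by simp only [Int.ofNat_eq_natCast]; push_cast; ring

theorem pvLowBit_false (n : Nat) (hn : n % 64 = 0) (i : Nat) (hi : i < 6) : n.testBit i = false := by
  interval_cases i <;> (simp [Nat.testBit, Nat.shiftRight_eq_div_pow]; omega)

theorem pvBridge (n : Nat) (hn : n % 64 = 0) (hlt : n ≤ 0x7FFFC0) :
    ((List.range 23).filter n.testBit).map (fun p => Int.ofNat p - 6)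
      = ((List.range 18).filter (fun i => n.testBit (i + 6))).map (fun i => Int.ofNat i) := by
  rw [pvShift6]
  congr 1
  have d1 : List.range 23 = List.range 6 ++ (List.range 17).map (· + 6) := by decide
  have d2 : (List.range 18).map (· + 6) = (List.range 17).map (· + 6) ++ [23] := by decide
  have r6 : List.range 6 = [0, 1, 2, 3, 4, 5] := by decide
  have h23 : n.testBit 23 = false := Nat.testBit_lt_two_pow (by omega)
  rw [d1, d2, List.filter_append, List.filter_append, r6]
  simp [pvLowBit_false n hn 0 (by omega), pvLowBit_false n hn 1 (by omega),
    pvLowBit_false n hn 2 (by omega), pvLowBit_false n hn 3 (by omega),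
    pvLowBit_false n hn 4 (by omega), pvLowBit_false n hn 5 (by omega), h23]

theorem pvBand_shape (rv : Int) :
    ∃ n : Nat, PySem.Int.band rv 0x7FFFC0 = (n : Int) ∧ n % 64 = 0 ∧ n ≤ 0x7FFFC0 := by
  have hmod64 : ∀ x : Nat, x &&& 63 = x % 64 := by
    intro x
    have := Nat.and_two_pow_sub_one_eq_mod x 6
    norm_num at this
    exact this
  have hM63 : (8388544 : Nat) &&& 63 = 0 := by decide
  unfold PySem.Int.band
  by_cases hrv : 0 ≤ rv
  · simp only [hrv, if_true, show (0:Int) ≤ 8388544 by norm_num]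
    refine ⟨rv.toNat &&& (8388544 : Int).toNat, by norm_num, ?_, ?_⟩
    · rw [← hmod64, show ((8388544 : Int).toNat = 8388544) from rfl, Nat.and_assoc, hM63,
        Nat.and_zero]
    · have := Nat.and_le_right (n := rv.toNat) (m := (8388544 : Int).toNat)
      simpa using this
  · simp only [hrv, if_false, show (0:Int) ≤ 8388544 by norm_num, if_true]
    set b := (-rv - 1).toNat with hb
    refine ⟨(8388544 : Int).toNat - ((8388544 : Int).toNat &&& b), by norm_num, ?_, ?_⟩
    · have hc : ((8388544 : Int).toNat &&& b) % 64 = 0 := by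
        rw [← hmod64, show ((8388544 : Int).toNat = 8388544) from rfl, Nat.and_comm 8388544 b,
          Nat.and_assoc, hM63, Nat.and_zero]
      have hcle : ((8388544 : Int).toNat &&& b) ≤ (8388544 : Int).toNat := Nat.and_le_left
      have h8 : ((8388544 : Int).toNat) % 64 = 0 := by decide
      omega
    · omega

-- ===== VERDICT (by name: the statement is the Claim_ definition above) =====
theorem processor_value_py_spec : Claim_equal_processor_value_py := by
  intro rv _
  unfold Spec_processor_value_py processor_value_py processor_value_py_alt
  obtain ⟨n, hm, h64, hle⟩ := pvBand_shape rv
  rw [hm]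
  simp only [Int.natCast_eq_zero, Int.toNat_natCast]
  by_cases h0 : n = 0
  · simp [h0]
  · simp only [h0, if_neg, not_false_iff]
    have hmasks : ([0x40, 0x80, 0x100, 0x200, 0x400, 0x800, 0x1000, 0x2000,
        0x4000, 0x8000, 0x10000, 0x20000, 0x40000, 0x80000,
        0x100000, 0x200000, 0x400000, 0x800000] : List Int)
        = (List.range 18).map (fun i => ((2 ^ (i + 6) : Nat) : Int)) := by decide
    rw [hmasks, pvFoldA n 18, pvLoop_bits 23 n (by omega), pvBridge n h64 hle]
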